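-- pv_equiv track=rewrite | github.com/Yash25gupta/Python | Challanges nextgencoder/33 Split List into 3 equal parts.py | splitInThree
-- ===== SOURCE A (Python) =====
-- def splitInThree(lst):
--     lst = sorted(lst, reverse=True)
--     out = [[], [], []]
--     temp = [0, 0, 0]
--     for j in lst:
--         i = temp.index(min(temp))
--         temp[i] += j
--         out[i].append(j)
--     return out
-- ===== SOURCE B (Python) =====
-- def splitInThree(lst):
--     # priority-queue variant: keep the three (sum, bucket) pairs as a sorted
--     # queue; pop the front (smallest sum, lowest bucket on ties) and reinsert.
--     out = [[], [], []]
--     q = [(0, 0), (0, 1), (0, 2)]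
--     for j in sorted(lst, reverse=True):
--         s, i = q.pop(0)
--         out[i].append(j)
--         e = (s + j, i)
--         k = 0
--         while k < len(q) and q[k] < e:
--             k += 1
--         q.insert(k, e)
--     return out
-- ===== Notes on version B (the rewrite author's own statement) =====
-- stated objective: alternative
-- what changed: Replaces the sums array with min()+index() scans per element by a sorted priority queue of (sum, bucket) pairs: pop the front, append, reinsert in order; tuple ordering reproduces the lowest-index tie-break.
import Mathlib
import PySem

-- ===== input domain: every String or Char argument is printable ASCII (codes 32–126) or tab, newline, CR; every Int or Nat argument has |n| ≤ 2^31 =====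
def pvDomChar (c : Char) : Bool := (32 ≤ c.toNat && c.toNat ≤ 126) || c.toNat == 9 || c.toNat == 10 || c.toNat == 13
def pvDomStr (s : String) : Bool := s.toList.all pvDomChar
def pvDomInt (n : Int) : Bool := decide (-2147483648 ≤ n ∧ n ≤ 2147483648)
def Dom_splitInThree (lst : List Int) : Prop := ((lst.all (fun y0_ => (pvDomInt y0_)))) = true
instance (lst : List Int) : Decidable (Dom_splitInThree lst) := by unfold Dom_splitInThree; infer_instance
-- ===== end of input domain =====

-- B replaces A's sums array (min scan + index scan per element) by a sorted priority queue of
-- (sum, bucket) pairs; an alternative of the same cost, proved to return the same three parts.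

-- ===== PORT A =====
def stepA (st : List (List Int) × List Int) (j : Int) : List (List Int) × List Int :=
  match PySem.List.min? st.2 (fun x => x) with
  | none => st
  | some m =>
    match PySem.List.index? st.2 m with
    | none => st
    | some i => (st.1.modify i (fun l => l ++ [j]), st.2.modify i (fun x => x + j))

def splitInThree (lst : List Int) : List (List Int) :=
  ((PySem.List.sorted lst (fun x => x) true).foldl stepA ([[], [], []], [0, 0, 0])).1

-- ===== PORT B =====
-- Python tuple order (s1,i1) < (s2,i2)
def pairLt (x e : Int × Int) : Bool := x.1 < e.1 || (x.1 == e.1 && x.2 < e.2)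

-- the while-loop + q.insert(k, e) of Source B: insert e before the first element not < e
def insPQ (e : Int × Int) : List (Int × Int) → List (Int × Int)
  | [] => [e]
  | x :: rest => if pairLt x e then x :: insPQ e rest else e :: x :: rest

def stepB (st : List (List Int) × List (Int × Int)) (j : Int) :
    List (List Int) × List (Int × Int) :=
  match st.2 with
  | [] => st  -- unreachable: q always holds three pairs (q.pop(0) would raise on empty)
  | (s, i) :: rest => (st.1.modify i.toNat (fun l => l ++ [j]), insPQ (s + j, i) rest)

def splitInThree_alt (lst : List Int) : List (List Int) :=
  ((PySem.List.sorted lst (fun x => x) true).foldl stepB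
    ([[], [], []], [(0, 0), (0, 1), (0, 2)])).1

-- ===== PRECONDITION & SPEC =====
def Spec_splitInThree (lst : List Int) (out : List (List Int)) : Prop := out = splitInThree_alt lst
instance (lst : List Int) (out : List (List Int)) : Decidable (Spec_splitInThree lst out) := by unfold Spec_splitInThree; infer_instance

-- ===== CLAIM (what is proved, stated in full; the proofs are below) =====
def Claim_equal_splitInThree : Prop := ∀ (lst : List Int), Dom_splitInThree lst → Spec_splitInThree lst (splitInThree lst)

-- ===== LEMMAS AND PROOFS =====

-- the sorted queue of the three (sum, index) pairs, by Python tuple order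
def sort3 (a b c : Int) : List (Int × Int) :=
  if a ≤ b then
    if a ≤ c then
      if b ≤ c then [(a, 0), (b, 1), (c, 2)] else [(a, 0), (c, 2), (b, 1)]
    else [(c, 2), (a, 0), (b, 1)]
  else
    if b ≤ c then
      if a ≤ c then [(b, 1), (a, 0), (c, 2)] else [(b, 1), (c, 2), (a, 0)]
    else [(c, 2), (b, 1), (a, 0)]

-- the common abstract step: which bucket receives j, and the new sums
def updOut (out : List (List Int)) (a b c j : Int) : List (List Int) :=
  if a ≤ b ∧ a ≤ c then out.modify 0 (fun l => l ++ [j])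
  else if b ≤ c then out.modify 1 (fun l => l ++ [j])
  else out.modify 2 (fun l => l ++ [j])

def updA (a b c j : Int) : Int × Int × Int :=
  if a ≤ b ∧ a ≤ c then (a + j, b, c) else if b ≤ c then (a, b + j, c) else (a, b, c + j)

lemma idx3_0 (a b c : Int) : List.idxOf? a [a, b, c] = some 0 := by
  simp [List.idxOf?, List.findIdx?, List.findIdx?.go]

lemma idx3_1 (a b c : Int) (hab : a ≠ b) : List.idxOf? b [a, b, c] = some 1 := by
  simp [List.idxOf?, List.findIdx?, List.findIdx?.go, hab]

lemma idx3_2 (a b c : Int) (hac : a ≠ c) (hbc : b ≠ c) :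
    List.idxOf? c [a, b, c] = some 2 := by
  simp [List.idxOf?, List.findIdx?, List.findIdx?.go, hac, hbc]

lemma stepA_eq (out : List (List Int)) (a b c j : Int) :
    stepA (out, [a, b, c]) j =
      (updOut out a b c j,
        [(updA a b c j).1, (updA a b c j).2.1, (updA a b c j).2.2]) := by
  have hfold : PySem.List.min? [a, b, c] (fun x => x) = some (min (min a b) c) := by
    rw [PySem.List.min?_id_cons]; simp [List.foldl]
  unfold stepA updOut updA
  by_cases h1 : a ≤ b ∧ a ≤ c
  · have hmin : PySem.List.min? [a, b, c] (fun x => x) = some a := by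
      rw [hfold]; congr 1; omega
    simp [hmin, idx3_0, h1, List.modify, List.modifyTailIdx, List.modifyTailIdx.go, List.modifyHead]
  · by_cases h2 : b ≤ c
    · have hmin : PySem.List.min? [a, b, c] (fun x => x) = some b := by
        rw [hfold]; congr 1; omega
      have hab : a ≠ b := by omega
      simp [hmin, idx3_1 a b c hab, h1, h2, List.modify, List.modifyTailIdx, List.modifyTailIdx.go, List.modifyHead]
    · have hmin : PySem.List.min? [a, b, c] (fun x => x) = some c := by
        rw [hfold]; congr 1; omega
      have hac : a ≠ c := by omega
      have hbc : b ≠ c := by omega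
      simp [hmin, idx3_2 a b c hac hbc, h1, h2, List.modify, List.modifyTailIdx, List.modifyTailIdx.go, List.modifyHead]

lemma stepB_eq (out : List (List Int)) (a b c j : Int) :
    stepB (out, sort3 a b c) j =
      (updOut out a b c j,
        sort3 (updA a b c j).1 (updA a b c j).2.1 (updA a b c j).2.2) := by
  unfold sort3 updOut updA stepB
  split_ifs <;>
    simp_all [insPQ, pairLt] <;>
    first
      | omega
      | (split_ifs <;> (try simp_all) <;> omega)

lemma bridge (l : List Int) : ∀ (out : List (List Int)) (a b c : Int),
    (l.foldl stepA (out, [a, b, c])).1 = (l.foldl stepB (out, sort3 a b c)).1 := by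
  induction l with
  | nil => intro out a b c; rfl
  | cons j t ih =>
    intro out a b c
    simp only [List.foldl_cons, stepA_eq, stepB_eq]
    exact ih _ _ _ _

-- ===== VERDICT (by name: the statement is the Claim_ definition above) =====
theorem splitInThree_spec : Claim_equal_splitInThree := by
  intro lst _
  unfold Spec_splitInThree splitInThree splitInThree_alt
  have h := bridge (PySem.List.sorted lst (fun x => x) true) [[], [], []] 0 0 0
  simpa [sort3] using h
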